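-- pv_equiv track=rewrite | github.com/Matthew11K/Yandex-Algorithms | yandex_alg_5.1.E.py | find_profit
-- ===== SOURCE A (Python) =====
-- def find_profit(n, k, d):
--     stack = [(n, 1)]
--
--     while stack:
--         num, day = stack.pop()
--
--         if day == d + 1:
--             if num % k == 0:
--                 return num
--             continue
--
--         remainder = num % k
--         for digit in range(10):
--             next_remainder = (remainder * 10 + digit) % k
--             if next_remainder == 0:
--                 stack.append((num * 10 + digit, day + 1))
--
--     return -1
-- ===== SOURCE B (Python) =====
-- def find_profit(n, k, d):
--     num = n
--     for _ in range(d):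
--         for digit in range(9, -1, -1):
--             if (num * 10 + digit) % k == 0:
--                 num = num * 10 + digit
--                 break
--         else:
--             return -1
--     return num if num % k == 0 else -1
-- ===== Notes on version B (the rewrite author's own statement) =====
-- stated objective: simpler
-- what changed: A's explicit stack-based DFS over (number, day) states is replaced by a single forward greedy loop: d times pick the largest digit 9..0 keeping the number divisible by k (no stack, no backtracking, which the DFS never actually needs), with the final divisibility check covering the d==0 case.
import Mathlib
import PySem

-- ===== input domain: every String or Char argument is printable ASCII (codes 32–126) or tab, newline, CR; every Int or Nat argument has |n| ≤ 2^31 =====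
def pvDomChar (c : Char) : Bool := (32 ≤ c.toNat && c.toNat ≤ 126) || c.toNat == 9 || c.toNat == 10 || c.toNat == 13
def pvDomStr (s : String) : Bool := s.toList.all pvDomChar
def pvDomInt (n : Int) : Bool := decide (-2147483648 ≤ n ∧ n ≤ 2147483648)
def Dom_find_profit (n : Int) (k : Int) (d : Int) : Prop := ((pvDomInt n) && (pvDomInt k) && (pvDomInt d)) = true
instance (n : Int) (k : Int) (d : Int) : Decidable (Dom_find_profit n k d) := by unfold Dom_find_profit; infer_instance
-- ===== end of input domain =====

-- B replaces A's stack DFS by a forward greedy loop (largest digit first, no stack): simpler, same cost.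

-- ===== PORT A =====
-- fuel makes the while-loop total; on Pre_ (k ≠ 0, 0 ≤ d) the fuel d.toNat+2 is never exhausted.
def find_profit_loop (k : Int) (d : Int) : Nat → List (Int × Int) → Int
  | 0, _ => -1
  | _ + 1, [] => -1
  | fuel + 1, (num, day) :: rest =>
    if day == d + 1 then
      if PySem.Int.mod num k == 0 then num
      else find_profit_loop k d fuel rest
    else
      let remainder := PySem.Int.mod num k
      let stack' := (PySem.List.pyRange 0 10 1).foldl
        (fun s digit =>
          if PySem.Int.mod (remainder * 10 + digit) k == 0 then
            (num * 10 + digit, day + 1) :: s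
          else s) rest
      find_profit_loop k d fuel stack'

def find_profit (n : Int) (k : Int) (d : Int) : Int :=
  find_profit_loop k d (d.toNat + 2) [(n, 1)]

-- ===== PORT B =====
def find_profit_alt_loop (k : Int) : Nat → Int → Option Int
  | 0, num => some num
  | m + 1, num =>
    match (PySem.List.pyRange 9 (-1) (-1)).find?
        (fun digit => PySem.Int.mod (num * 10 + digit) k == 0) with
    | some digit => find_profit_alt_loop k m (num * 10 + digit)
    | none => none

def find_profit_alt (n : Int) (k : Int) (d : Int) : Int :=
  match find_profit_alt_loop k d.toNat n with
  | none => -1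
  | some num => if PySem.Int.mod num k == 0 then num else -1

-- ===== PRECONDITION & SPEC =====
-- Pre_ excludes k = 0, where A raises ZeroDivisionError, and the d < 0 inputs on which A
-- diverges (A returns for d < 0 only when no digit can extend n, and those inputs are admitted).
def Pre_find_profit (n : Int) (k : Int) (d : Int) : Prop :=
  k ≠ 0 ∧ (0 ≤ d ∨ ∀ digit ∈ PySem.List.pyRange 0 10 1, PySem.Int.mod (n * 10 + digit) k ≠ 0)
instance (n : Int) (k : Int) (d : Int) : Decidable (Pre_find_profit n k d) := by
  unfold Pre_find_profit; infer_instance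

def pvWitness_find_profit : Int × Int × Int := (12, 3, 2)

def Spec_find_profit (n : Int) (k : Int) (d : Int) (out : Int) : Prop := out = find_profit_alt n k d
instance (n : Int) (k : Int) (d : Int) (out : Int) : Decidable (Spec_find_profit n k d out) := by
  unfold Spec_find_profit; infer_instance

-- ===== CLAIM (what is proved, stated in full; the proofs are below) =====
def Claim_equal_find_profit : Prop := ∀ (n : Int) (k : Int) (d : Int), Dom_find_profit n k d → Pre_find_profit n k d → Spec_find_profit n k d (find_profit n k d)

-- ===== LEMMAS AND PROOFS =====

-- % k congruence: replacing num by num % k inside (·*10+digit) % k == 0 changes nothing.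
theorem pv_mod_cong_zero (a b k : Int) :
    (PySem.Int.mod (PySem.Int.mod a k * 10 + b) k = 0) ↔ (PySem.Int.mod (a * 10 + b) k = 0) := by
  rw [PySem.Int.mod_eq_zero_iff_dvd, PySem.Int.mod_eq_zero_iff_dvd]
  have h := PySem.Int.floordiv_mul_add_mod a k
  have hk10 : k ∣ k * (PySem.Int.floordiv a k * 10) := Dvd.intro _ rfl
  have e : a * 10 + b = (PySem.Int.mod a k * 10 + b) + k * (PySem.Int.floordiv a k * 10) := by
    nlinarith [h]
  constructor
  · intro hd; rw [e]; exact dvd_add hd hk10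
  · intro hd
    rw [e] at hd
    have := dvd_sub hd hk10
    simpa using this

theorem pv_find?_eq_head?_filter (p : Int → Bool) :
    ∀ l : List Int, l.find? p = (l.filter p).head? := by
  intro l
  induction l with
  | nil => rfl
  | cons x xs ih =>
    by_cases hx : p x
    · rw [List.find?_cons_of_pos hx, List.filter_cons_of_pos hx]
      rfl
    · rw [List.find?_cons_of_neg hx, List.filter_cons_of_neg hx, ih]

-- A's append loop builds the reversed filtered digit list on top of the old stack.
theorem pv_foldl_filter (p : Int → Bool) (f : Int → Int × Int) :
    ∀ (l : List Int) (rest : List (Int × Int)),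
      l.foldl (fun s digit => if p digit then f digit :: s else s) rest
        = ((l.filter p).reverse.map f) ++ rest := by
  intro l
  induction l with
  | nil => intro rest; simp
  | cons x xs ih =>
    intro rest
    by_cases hx : p x <;> simp [List.foldl_cons, hx, ih]

theorem pv_countdown_reverse :
    PySem.List.pyRange 9 (-1) (-1) = (PySem.List.pyRange 0 10 1).reverse := by decide

-- Main invariant: once the current number is divisible by k, A's DFS never backtracks and
-- tracks B's greedy loop exactly, with s appended digits still to choose.
theorem pv_loop_eq (k d : Int) :
    ∀ (s fuel : Nat) (num : Int) (rest : List (Int × Int)),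
      s + 1 ≤ fuel → PySem.Int.mod num k = 0 →
      ∃ v, find_profit_alt_loop k s num = some v ∧ PySem.Int.mod v k = 0 ∧
        find_profit_loop k d fuel ((num, d + 1 - (s : Int)) :: rest) = v := by
  intro s
  induction s with
  | zero =>
    intro fuel num rest hf hm
    obtain ⟨f, rfl⟩ : ∃ f, fuel = f + 1 := ⟨fuel - 1, by omega⟩
    refine ⟨num, rfl, hm, ?_⟩
    simp [find_profit_loop, hm]
  | succ s ih =>
    intro fuel num rest hf hm
    obtain ⟨f, rfl⟩ : ∃ f, fuel = f + 1 := ⟨fuel - 1, by omega⟩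
    have hday : ((d + 1 - ((s : Int) + 1) == d + 1)) = false := by
      simp; omega
    set p : Int → Bool := fun digit => PySem.Int.mod (num * 10 + digit) k == 0 with hpdef
    have hp : ∀ digit : Int,
        (PySem.Int.mod (PySem.Int.mod num k * 10 + digit) k == 0) = p digit := by
      intro digit
      by_cases h : PySem.Int.mod (num * 10 + digit) k = 0
      · simp [hpdef, h, (pv_mod_cong_zero num digit k).mpr h]
      · have h2 : ¬ PySem.Int.mod (PySem.Int.mod num k * 10 + digit) k = 0 :=
          fun hc => h ((pv_mod_cong_zero num digit k).mp hc)
        simp [hpdef, h, h2]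
    have hq : (PySem.List.pyRange 0 10 1).filter
          (fun digit => PySem.Int.mod (PySem.Int.mod num k * 10 + digit) k == 0)
        = (PySem.List.pyRange 0 10 1).filter p :=
      List.filter_congr (fun x _ => hp x)
    have hdvd : k ∣ num := (PySem.Int.mod_eq_zero_iff_dvd num k).mp hm
    have hp0 : p 0 = true := by
      have h0 : PySem.Int.mod (num * 10 + 0) k = 0 := by
        rw [PySem.Int.mod_eq_zero_iff_dvd]
        simpa using hdvd.mul_right 10
      simp [hpdef] at h0 ⊢
      simpa using h0
    have hmem0 : (0 : Int) ∈ (PySem.List.pyRange 0 10 1).filter p := by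
      refine List.mem_filter.mpr ⟨?_, hp0⟩
      decide
    obtain ⟨m, tl, hrev⟩ : ∃ m tl, ((PySem.List.pyRange 0 10 1).filter p).reverse = m :: tl := by
      cases hx : ((PySem.List.pyRange 0 10 1).filter p).reverse with
      | nil =>
        rw [List.reverse_eq_nil_iff] at hx
        rw [hx] at hmem0
        exact absurd hmem0 (List.not_mem_nil)
      | cons m tl => exact ⟨m, tl, rfl⟩
    have hmmem : m ∈ (PySem.List.pyRange 0 10 1).filter p := by
      have : m ∈ ((PySem.List.pyRange 0 10 1).filter p).reverse := by
        rw [hrev]; exact List.mem_cons_self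
      exact List.mem_reverse.mp this
    have hpm : PySem.Int.mod (num * 10 + m) k = 0 := by
      have := (List.mem_filter.mp hmmem).2
      simpa [hpdef] using this
    have hfind : (PySem.List.pyRange 9 (-1) (-1)).find? p = some m := by
      rw [pv_countdown_reverse, pv_find?_eq_head?_filter, List.filter_reverse, hrev]
      rfl
    have hA : find_profit_loop k d (f + 1) ((num, d + 1 - ((s : Int) + 1)) :: rest)
        = find_profit_loop k d f ((num * 10 + m, d + 1 - (s : Int))
            :: (tl.map (fun digit => (num * 10 + digit, d + 1 - (s : Int))) ++ rest)) := by
      rw [find_profit_loop]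
      rw [if_neg (by simpa using hday)]
      dsimp only
      rw [pv_foldl_filter (fun digit => PySem.Int.mod (PySem.Int.mod num k * 10 + digit) k == 0)
        (fun digit => (num * 10 + digit, d + 1 - ((s : Int) + 1) + 1)) (PySem.List.pyRange 0 10 1) rest]
      rw [hq, hrev]
      have harith : d + 1 - ((s : Int) + 1) + 1 = d + 1 - (s : Int) := by ring
      rw [harith]
      simp
    obtain ⟨v, hv1, hv2, hv3⟩ := ih f (num * 10 + m)
      (tl.map (fun digit => (num * 10 + digit, d + 1 - (s : Int))) ++ rest) (by omega) hpm
    refine ⟨v, ?_, hv2, ?_⟩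
    · rw [find_profit_alt_loop, hfind]
      dsimp only
      exact hv1
    · push_cast
      rw [hA, hv3]

-- ===== VERDICT (by name: the statement is the Claim_ definition above) =====
theorem find_profit_spec : Claim_equal_find_profit := by
  intro n k d _ hpre
  obtain ⟨hk, hor⟩ := hpre
  unfold Spec_find_profit
  by_cases hdn : 0 ≤ d
  case neg =>
    -- d < 0: no digit fits, so A pushes nothing and pops the empty stack; B skips its loop
    have hall : ∀ digit ∈ PySem.List.pyRange 0 10 1, PySem.Int.mod (n * 10 + digit) k ≠ 0 := by
      rcases hor with h | h
      · exact absurd h hdn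
      · exact h
    have hmn : PySem.Int.mod n k ≠ 0 := by
      intro h0
      have hdvd : k ∣ n := (PySem.Int.mod_eq_zero_iff_dvd n k).mp h0
      have h1 : PySem.Int.mod (n * 10 + 0) k = 0 := by
        rw [PySem.Int.mod_eq_zero_iff_dvd]
        simpa using hdvd.mul_right 10
      exact hall 0 (by decide) h1
    have hdt : d.toNat = 0 := by omega
    have hday : ((1 : Int) == d + 1) = false := by simp; omega
    have hfilter : (PySem.List.pyRange 0 10 1).filter
        (fun digit => PySem.Int.mod (PySem.Int.mod n k * 10 + digit) k == 0) = [] := by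
      rw [List.filter_eq_nil_iff]
      intro a ha
      simp only [beq_iff_eq]
      exact fun hc => hall a ha ((pv_mod_cong_zero n a k).mp hc)
    show find_profit_loop k d (d.toNat + 2) [(n, 1)] = find_profit_alt n k d
    rw [hdt]
    rw [find_profit_loop, if_neg (by simpa using hday)]
    dsimp only
    rw [pv_foldl_filter (fun digit => PySem.Int.mod (PySem.Int.mod n k * 10 + digit) k == 0)
      (fun digit => (n * 10 + digit, (1 : Int) + 1)) (PySem.List.pyRange 0 10 1) []]
    rw [hfilter]
    simp only [List.reverse_nil, List.map_nil, List.nil_append]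
    rw [show find_profit_loop k d 1 [] = -1 from by rw [find_profit_loop]]
    unfold find_profit_alt
    rw [hdt]
    dsimp only [find_profit_alt_loop]
    simp [hmn]
  case pos =>
   have hd := hdn
   by_cases hd0 : d = 0
   · subst hd0
     simp only [find_profit, find_profit_alt, Int.toNat_zero, find_profit_alt_loop, find_profit_loop]
     by_cases hm : PySem.Int.mod n k = 0
     · simp [hm]
     · simp [hm, find_profit_loop]
   · -- d ≥ 1
     have hd1 : 1 ≤ d := by omega
     set p : Int → Bool := fun digit => PySem.Int.mod (n * 10 + digit) k == 0 with hpdef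
     have hp : ∀ digit : Int,
         (PySem.Int.mod (PySem.Int.mod n k * 10 + digit) k == 0) = p digit := by
       intro digit
       by_cases h : PySem.Int.mod (n * 10 + digit) k = 0
       · simp [hpdef, h, (pv_mod_cong_zero n digit k).mpr h]
       · have h2 : ¬ PySem.Int.mod (PySem.Int.mod n k * 10 + digit) k = 0 :=
           fun hc => h ((pv_mod_cong_zero n digit k).mp hc)
         simp [hpdef, h, h2]
     have hq : (PySem.List.pyRange 0 10 1).filter
           (fun digit => PySem.Int.mod (PySem.Int.mod n k * 10 + digit) k == 0)
         = (PySem.List.pyRange 0 10 1).filter p :=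
       List.filter_congr (fun x _ => hp x)
     have hday1 : ((1 : Int) == d + 1) = false := by simp; omega
     have hstep : find_profit n k d
         = find_profit_loop k d (d.toNat + 1)
             (((PySem.List.pyRange 0 10 1).filter p).reverse.map
               (fun digit => (n * 10 + digit, (1 : Int) + 1))) := by
       show find_profit_loop k d (d.toNat + 1 + 1) [(n, 1)] = _
       rw [find_profit_loop, if_neg (by simpa using hday1)]
       dsimp only
       rw [pv_foldl_filter (fun digit => PySem.Int.mod (PySem.Int.mod n k * 10 + digit) k == 0)
         (fun digit => (n * 10 + digit, (1 : Int) + 1)) (PySem.List.pyRange 0 10 1) []]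
       rw [hq]
       simp
     obtain ⟨s, hs⟩ : ∃ s : Nat, d.toNat = s + 1 := ⟨d.toNat - 1, by omega⟩
     have hsint : (s : Int) = d - 1 := by omega
     cases hrev : ((PySem.List.pyRange 0 10 1).filter p).reverse with
     | nil =>
       -- no digit fits: A pops the empty stack, B's first scan fails
       have hfind : (PySem.List.pyRange 9 (-1) (-1)).find? p = none := by
         rw [pv_countdown_reverse, pv_find?_eq_head?_filter, List.filter_reverse, hrev]
         rfl
       rw [hstep, hrev]
       simp only [List.map_nil]
       rw [show find_profit_loop k d (d.toNat + 1) [] = -1 from by rw [find_profit_loop]]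
       show (-1 : Int) = find_profit_alt n k d
       unfold find_profit_alt
       rw [hs, find_profit_alt_loop, hfind]
     | cons m tl =>
       have hmmem : m ∈ (PySem.List.pyRange 0 10 1).filter p := by
         have : m ∈ ((PySem.List.pyRange 0 10 1).filter p).reverse := by
           rw [hrev]; exact List.mem_cons_self
         exact List.mem_reverse.mp this
       have hpm : PySem.Int.mod (n * 10 + m) k = 0 := by
         have := (List.mem_filter.mp hmmem).2
         simpa [hpdef] using this
       have hfind : (PySem.List.pyRange 9 (-1) (-1)).find? p = some m := by
         rw [pv_countdown_reverse, pv_find?_eq_head?_filter, List.filter_reverse, hrev]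
         rfl
       obtain ⟨v, hv1, hv2, hv3⟩ := pv_loop_eq k d s (d.toNat + 1) (n * 10 + m)
         (tl.map (fun digit => (n * 10 + digit, (1 : Int) + 1)) ++ []) (by omega) hpm
       have hday2 : d + 1 - (s : Int) = (1 : Int) + 1 := by omega
       rw [hstep, hrev]
       simp only [List.map_cons]
       rw [hday2] at hv3
       have hA : find_profit_loop k d (d.toNat + 1)
           ((n * 10 + m, (1 : Int) + 1)
             :: tl.map (fun digit => (n * 10 + digit, (1 : Int) + 1))) = v := by
         simpa using hv3
       rw [hA]
       unfold find_profit_alt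
       rw [hs, find_profit_alt_loop, hfind]
       dsimp only
       rw [hv1]
       simp [hv2]
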